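-- pv_equiv track=rewrite | github.com/MHGanainy/progressive_adapter_peft | generate_config.py | get_adapter_mapping_for_court
-- ===== SOURCE A (Python) =====
-- COURT_TREE = {
--     "AC": {
--         "description": "All Courts",
--         "rank": 64,
--         "children": {
--             "EC": {
--                 "description": "European Courts",
--                 "rank": 32,
--                 "children": {
--                     "ECHR": {
--                         "description": "European Court of Human Rights",
--                         "rank": 16,
--                         "children": {}
--                     },
--                     "EUC": {
--                         "description": "EU Courts",
--                         "rank": 16,
--                         "children": {}
--                     }
--                 }
--             },
--             "CC": {
--                 "description": "Commonwealth Courts",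
--                 "rank": 32,
--                 "children": {
--                     "IC": {
--                         "description": "Indian Courts",
--                         "rank": 16,
--                         "children": {}
--                     },
--                     "ACC": {
--                         "description": "Anglo-Canadian Courts",
--                         "rank": 16,
--                         "children": {
--                             "UKC": {
--                                 "description": "UK Courts",
--                                 "rank": 13,
--                                 "children": {}
--                             },
--                             "CAC": {
--                                 "description": "Canadian Courts",
--                                 "rank": 13,
--                                 "children": {}
--                             }
--                         }
--                     }
--                 }
--             }
--         }
--     }
-- }
--
-- def get_adapter_mapping_for_court(target_court, layer_assignments):
--     adapter_names = {}
--
--     # Helper function to find the path to the target court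
--     def find_path(node, path):
--         node_name = path[-1]
--         if node_name == target_court:
--             return path
--         if 'children' in node and node['children']:
--             for child_name, child_node in node['children'].items():
--                 result = find_path(child_node, path + [child_name])
--                 if result:
--                     return result
--         return None
--
--     # Find the path from root to target court
--     path = find_path(COURT_TREE['AC'], ['AC'])
--     if not path:
--         raise ValueError(f"Target court '{target_court}' not found in the court tree.")
--
--     # Build the adapter names mapping
--     for node_name in path:
--         layers = layer_assignments.get(node_name, [])
--         for layer in layers:
--             adapter_names[layer] = f"layer_{layer}_adapter_{node_name}"
--
--     # Include adapters assigned directly to the target court (if any)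
--     if target_court in layer_assignments and target_court not in path:
--         layers = layer_assignments[target_court]
--         for layer in layers:
--             adapter_names[layer] = f"layer_{layer}_adapter_{target_court}"
--
--     return adapter_names
-- ===== SOURCE B (Python) =====
-- _PATHS = {
--     "AC": ["AC"],
--     "EC": ["AC", "EC"],
--     "ECHR": ["AC", "EC", "ECHR"],
--     "EUC": ["AC", "EC", "EUC"],
--     "CC": ["AC", "CC"],
--     "IC": ["AC", "CC", "IC"],
--     "ACC": ["AC", "CC", "ACC"],
--     "UKC": ["AC", "CC", "ACC", "UKC"],
--     "CAC": ["AC", "CC", "ACC", "CAC"],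
-- }
--
-- def get_adapter_mapping_for_court(target_court, layer_assignments):
--     path = _PATHS.get(target_court)
--     if path is None:
--         raise ValueError(f"Target court '{target_court}' not found in the court tree.")
--     return {
--         layer: f"layer_{layer}_adapter_{name}"
--         for name in path
--         for layer in layer_assignments.get(name, [])
--     }
-- ===== Notes on version B (the rewrite author's own statement) =====
-- stated objective: simpler
-- what changed: B replaces A's per-call recursive DFS over the nested COURT_TREE with a precomputed name-to-path table lookup, builds the mapping as a single dict comprehension over the path, and drops A's dead final block (the target is always the last path element).
import Mathlib
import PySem

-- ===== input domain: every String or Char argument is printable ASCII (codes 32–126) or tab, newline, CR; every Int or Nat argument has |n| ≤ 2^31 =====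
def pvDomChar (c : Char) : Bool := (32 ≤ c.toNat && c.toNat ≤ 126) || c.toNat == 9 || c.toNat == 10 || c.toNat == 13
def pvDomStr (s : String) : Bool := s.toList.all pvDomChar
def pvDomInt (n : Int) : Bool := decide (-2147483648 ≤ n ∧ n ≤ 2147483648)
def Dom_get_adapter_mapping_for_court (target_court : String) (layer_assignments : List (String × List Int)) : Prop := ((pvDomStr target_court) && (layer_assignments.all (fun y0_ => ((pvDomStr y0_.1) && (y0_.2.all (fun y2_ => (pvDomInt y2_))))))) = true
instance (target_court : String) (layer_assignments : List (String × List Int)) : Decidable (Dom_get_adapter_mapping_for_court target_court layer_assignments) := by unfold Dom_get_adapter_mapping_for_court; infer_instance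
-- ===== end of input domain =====

-- B replaces A's recursive tree search by a precomputed name→path table and a dict
-- comprehension over the path (A's dead final block is dropped); objective: simpler.
-- Equivalence is about the return value; neither version mutates its arguments.

-- ===== PORT A =====
-- COURT_TREE: a nested dict of dicts in Python; encoded as a mutual pair (no nested inductive).
mutual
inductive CTree where
  | mk (description : String) (rank : Int) (children : CTreeChildren)
inductive CTreeChildren where
  | nil
  | cons (name : String) (t : CTree) (rest : CTreeChildren)
end

def courtTreeAC : CTree :=
  .mk "All Courts" 64 (
    .cons "EC" (.mk "European Courts" 32 (
      .cons "ECHR" (.mk "European Court of Human Rights" 16 .nil) (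
      .cons "EUC" (.mk "EU Courts" 16 .nil) .nil)))
    (.cons "CC" (.mk "Commonwealth Courts" 32 (
      .cons "IC" (.mk "Indian Courts" 16 .nil) (
      .cons "ACC" (.mk "Anglo-Canadian Courts" 16 (
        .cons "UKC" (.mk "UK Courts" 13 .nil) (
        .cons "CAC" (.mk "Canadian Courts" 13 .nil) .nil))) .nil)))
    .nil))

-- find_path: node_name = path[-1]; if it is the target return path, else recurse over children.
mutual
def findPath (target : String) (node : CTree) (path : List String) : Option (List String) :=
  if PySem.List.pyGet? path (-1) = some target then some path
  else match node with
    | .mk _ _ children => findPathChildren target children path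
def findPathChildren (target : String) (cs : CTreeChildren) (path : List String) : Option (List String) :=
  match cs with
  | .nil => none
  | .cons name child rest =>
    match findPath target child (path ++ [name]) with
    | some r => some r
    | none => findPathChildren target rest path
end

def get_adapter_mapping_for_court (target_court : String) (layer_assignments : List (String × List Int)) : List (Int × String) :=
  match findPath target_court courtTreeAC ["AC"] with
  | none => []  -- Python raises ValueError here; excluded by Pre_
  | some path =>
    let la := PySem.Dict.mk layer_assignments
    let adapter_names : PySem.Dict Int String :=
      path.foldl (fun d node_name =>
        (la.getD node_name []).foldl
          (fun d layer => d.insert layer ("layer_" ++ PySem.Int.toStr layer ++ "_adapter_" ++ node_name)) d)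
        PySem.Dict.empty
    -- final block of A: target in layer_assignments and target not in path
    let adapter_names :=
      if la.contains target_court && !(path.contains target_court) then
        (la.getD target_court []).foldl
          (fun d layer => d.insert layer ("layer_" ++ PySem.Int.toStr layer ++ "_adapter_" ++ target_court)) adapter_names
      else adapter_names
    adapter_names.items

-- ===== PORT B =====
def pathIndex : List (String × List String) :=
  [("AC", ["AC"]),
   ("EC", ["AC", "EC"]),
   ("ECHR", ["AC", "EC", "ECHR"]),
   ("EUC", ["AC", "EC", "EUC"]),
   ("CC", ["AC", "CC"]),
   ("IC", ["AC", "CC", "IC"]),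
   ("ACC", ["AC", "CC", "ACC"]),
   ("UKC", ["AC", "CC", "ACC", "UKC"]),
   ("CAC", ["AC", "CC", "ACC", "CAC"])]

def get_adapter_mapping_for_court_alt (target_court : String) (layer_assignments : List (String × List Int)) : List (Int × String) :=
  match (PySem.Dict.mk pathIndex).get? target_court with
  | none => []  -- Python raises ValueError here; excluded by Pre_
  | some path =>
    -- dict comprehension: pairs in path order, later inserts overwrite
    ((path.flatMap (fun name =>
        ((PySem.Dict.mk layer_assignments).getD name []).map
          (fun layer => (layer, "layer_" ++ PySem.Int.toStr layer ++ "_adapter_" ++ name)))).foldl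
      (fun d p => d.insert p.1 p.2) (PySem.Dict.empty : PySem.Dict Int String)).items

-- ===== PRECONDITION & SPEC =====
-- Pre_ excludes exactly the targets not in the court tree, where A raises ValueError (B raises the same).
def Pre_get_adapter_mapping_for_court (target_court : String) (layer_assignments : List (String × List Int)) : Prop :=
  target_court ∈ ["AC", "EC", "ECHR", "EUC", "CC", "IC", "ACC", "UKC", "CAC"]
instance (target_court : String) (layer_assignments : List (String × List Int)) : Decidable (Pre_get_adapter_mapping_for_court target_court layer_assignments) := by unfold Pre_get_adapter_mapping_for_court; infer_instance

def pvWitness_get_adapter_mapping_for_court : String × (List (String × List Int)) :=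
  ("ECHR", [("AC", [0, 2]), ("ECHR", [2, 5]), ("XY", [1])])

def Spec_get_adapter_mapping_for_court (target_court : String) (layer_assignments : List (String × List Int)) (out : List (Int × String)) : Prop := out = get_adapter_mapping_for_court_alt target_court layer_assignments
instance (target_court : String) (layer_assignments : List (String × List Int)) (out : List (Int × String)) : Decidable (Spec_get_adapter_mapping_for_court target_court layer_assignments out) := by unfold Spec_get_adapter_mapping_for_court; infer_instance

-- ===== CLAIM (what is proved, stated in full; the proofs are below) =====
def Claim_equal_get_adapter_mapping_for_court : Prop := ∀ (target_court : String) (layer_assignments : List (String × List Int)), Dom_get_adapter_mapping_for_court target_court layer_assignments → Pre_get_adapter_mapping_for_court target_court layer_assignments → Spec_get_adapter_mapping_for_court target_court layer_assignments (get_adapter_mapping_for_court target_court layer_assignments)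

-- ===== LEMMAS AND PROOFS =====

-- A's nested build loop equals B's fold over the flattened (layer, name-string) pairs.
lemma build_eq (la : List (String × List Int)) (path : List String) (d0 : PySem.Dict Int String) :
    path.foldl (fun d node_name =>
        ((PySem.Dict.mk la).getD node_name []).foldl
          (fun d layer => d.insert layer ("layer_" ++ PySem.Int.toStr layer ++ "_adapter_" ++ node_name)) d) d0
    = (path.flatMap (fun name =>
        ((PySem.Dict.mk la).getD name []).map
          (fun layer => (layer, "layer_" ++ PySem.Int.toStr layer ++ "_adapter_" ++ name)))).foldl
        (fun d p => d.insert p.1 p.2) d0 := by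
  induction path generalizing d0 with
  | nil => rfl
  | cons n rest ih =>
    simp only [List.foldl_cons, List.flatMap_cons, List.foldl_append, List.foldl_map, ih]

-- Per-target: given the (closed) path both lookups produce, the two ports agree.
lemma case_lemma (t : String) (P : List String)
    (hA : findPath t courtTreeAC ["AC"] = some P)
    (hB : (PySem.Dict.mk pathIndex).get? t = some P)
    (hmem : P.contains t = true)
    (la : List (String × List Int)) :
    get_adapter_mapping_for_court t la = get_adapter_mapping_for_court_alt t la := by
  simp only [get_adapter_mapping_for_court, get_adapter_mapping_for_court_alt, hA, hB, hmem,
    Bool.not_true, Bool.and_false, if_neg (by simp : ¬ (false = true)), build_eq]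

-- ===== VERDICT (by name: the statement is the Claim_ definition above) =====
theorem get_adapter_mapping_for_court_spec : Claim_equal_get_adapter_mapping_for_court := by
  intro t la _ hpre
  unfold Pre_get_adapter_mapping_for_court at hpre
  fin_cases hpre <;> exact case_lemma _ _ rfl (by decide) (by decide) la
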